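-- pv_equiv track=rewrite | github.com/Murkyshadow/Algorithms_7.0_Yandex | Занятие 3 (Битовые операции, исправляющие коды Хэмминга, сжатие данных)/I. Исправление одной ошибки.py | counter_number_of_unit
-- ===== SOURCE A (Python) =====
-- def counter_number_of_unit(s):
--     """
--     считаем единицы в step разрядах черех step, потом в step*2 разрядах черех step*2 разрядов,
--     затем в  в step*4 разрядах черех step*4 и тд
--     :param s: список с разрядами
--     """
--     step = 1  # считаем единицы в 1ом разряде, 1 пропускаем до конца строки, потом увеличиваем шаг и считаем единицы в 2x разрядах, 2 пропускаем, затем в 4х, 8ми и тд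
--     units = [] # наши насчитанные единицы
--     while step < len(s):
--         now_ind = step - 1
--         count_unit = 0
--         while now_ind < len(s):  # насчитываем единицы с опред. шагом
--             for i in range(now_ind, min(len(s), now_ind + step)):
--                 if s[i] == '1':
--                     count_unit += 1
--             now_ind = (i + 1) + step  # пропускаем step разрядов
--         units.append(count_unit)
--         step *= 2
--     return units
-- ===== SOURCE B (Python) =====
-- def counter_number_of_unit(s):
--     n = len(s)
--     units = []
--     b = 0
--     while (1 << b) < n:
--         units.append(sum(1 for i in range(n) if s[i] == '1' and ((i + 1) >> b) & 1))
--         b += 1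
--     return units
-- ===== Notes on version B (the rewrite author's own statement) =====
-- stated objective: simpler
-- what changed: Replaces A's nested block-scan/skip index loops (inner while + for with leftover loop-variable arithmetic) by a direct per-group comprehension that tests bit b of the 1-indexed position, ((i+1)>>b)&1.
import Mathlib
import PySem

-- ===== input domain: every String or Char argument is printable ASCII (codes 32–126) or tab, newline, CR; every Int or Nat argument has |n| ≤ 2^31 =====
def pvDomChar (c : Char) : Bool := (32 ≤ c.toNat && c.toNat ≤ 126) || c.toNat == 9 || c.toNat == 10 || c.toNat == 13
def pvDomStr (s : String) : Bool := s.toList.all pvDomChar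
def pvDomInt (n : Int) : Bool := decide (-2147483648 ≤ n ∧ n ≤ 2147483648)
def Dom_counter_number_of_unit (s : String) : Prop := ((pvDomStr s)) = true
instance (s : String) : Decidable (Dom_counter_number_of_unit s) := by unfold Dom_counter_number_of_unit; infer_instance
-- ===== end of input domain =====

-- B replaces A's nested block-scan/skip loops with a direct bit test ((i+1)>>b)&1 per
-- parity group, computed by one comprehension per group: simpler, same exact result.

-- ===== PORT A =====
-- inner 'while now_ind < len(s)' loop of A; count_unit is a Python int → Int.
-- Python's for-variable i equals stop - 1 after the (nonempty) 'for i in range(now_ind, stop)',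
-- stop = min(len(s), now_ind + step), so 'now_ind = (i + 1) + step' is '(stop - 1) + 1 + step'.
def pvInnerA (cs : List Char) (step : Nat) (hstep : 0 < step) (nowInd : Nat) (count : Int) : Int :=
  if h : nowInd < cs.length then
    pvInnerA cs step hstep ((min cs.length (nowInd + step) - 1) + 1 + step)
      ((List.range' nowInd (min cs.length (nowInd + step) - nowInd)).foldl
        (fun c i => if cs.getD i ' ' == '1' then c + 1 else c) count)
  else count
termination_by cs.length - nowInd
decreasing_by omega

-- outer 'while step < len(s)' loop of A
def pvOuterA (cs : List Char) (step : Nat) (hstep : 0 < step) (units : List Int) : List Int :=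
  if h : step < cs.length then
    pvOuterA cs (step * 2) (by omega) (units ++ [pvInnerA cs step hstep (step - 1) 0])
  else units
termination_by cs.length - step
decreasing_by omega

def counter_number_of_unit (s : String) : List Int :=
  pvOuterA s.toList 1 (by omega) []

-- ===== PORT B =====
-- sum(1 for i in range(n) if s[i] == '1' and ((i + 1) >> b) & 1)
def pvCountB (cs : List Char) (b : Nat) : Int :=
  (List.range cs.length).foldl
    (fun acc i => if cs.getD i ' ' == '1' && ((i + 1) >>> b) &&& 1 == 1 then acc + 1 else acc) 0

-- 'while (1 << b) < n' loop of B
def pvLoopB (cs : List Char) (b : Nat) (units : List Int) : List Int :=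
  if _h : 1 <<< b < cs.length then
    pvLoopB cs (b + 1) (units ++ [pvCountB cs b])
  else units
termination_by cs.length - 1 <<< b
decreasing_by
  simp only [Nat.one_shiftLeft] at *
  have : 2 ^ b < 2 ^ (b + 1) := Nat.pow_lt_pow_succ (by norm_num)
  omega

def counter_number_of_unit_alt (s : String) : List Int :=
  pvLoopB s.toList 0 []

-- ===== PRECONDITION & SPEC =====
def Spec_counter_number_of_unit (s : String) (out : List Int) : Prop := out = counter_number_of_unit_alt s
instance (s : String) (out : List Int) : Decidable (Spec_counter_number_of_unit s out) := by unfold Spec_counter_number_of_unit; infer_instance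

-- ===== CLAIM (what is proved, stated in full; the proofs are below) =====
def Claim_equal_counter_number_of_unit : Prop := ∀ (s : String), Dom_counter_number_of_unit s → Spec_counter_number_of_unit s (counter_number_of_unit s)

-- ===== LEMMAS AND PROOFS =====

-- "position i (0-based) contributes to the group of size `step`":
-- s[i] = '1' and the quotient (i+1)/step is odd
def pvPred (cs : List Char) (step i : Nat) : Bool :=
  cs.getD i ' ' == '1' && (i + 1) / step % 2 == 1

lemma pvRange'_split (s m n : Nat) (h : m ≤ n) :
    List.range' s n = List.range' s m ++ List.range' (s + m) (n - m) := by
  have := List.range'_append (s := s) (m := m) (n := n - m) (step := 1)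
  simp only [one_mul] at this
  rw [this, Nat.add_sub_cancel' h]

lemma pvPred_false_of_even (cs : List Char) (step i q : Nat)
    (h1 : (2 * q) * step ≤ i + 1) (h2 : i + 1 < (2 * q + 1) * step) :
    pvPred cs step i = false := by
  have hq : (i + 1) / step = 2 * q := Nat.div_eq_of_lt_le h1 h2
  simp [pvPred, hq, Nat.mul_mod_right]

lemma pvPred_of_odd (cs : List Char) (step i k : Nat)
    (h1 : (2 * k + 1) * step ≤ i + 1) (h2 : i + 1 < (2 * k + 2) * step) :
    pvPred cs step i = (cs.getD i ' ' == '1') := by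
  have e : (2 * k + 1 + 1) * step = (2 * k + 2) * step := by ring
  have hq : (i + 1) / step = 2 * k + 1 := Nat.div_eq_of_lt_le h1 (by omega)
  simp [pvPred, hq]

-- the inner-loop characterisation: starting at now_ind with now_ind + 1 = (2k+1)*step,
-- A's inner loop adds the number of '1' positions with odd quotient (i+1)/step from now_ind on.
lemma pvInnerA_eq (cs : List Char) (step : Nat) (hstep : 0 < step) :
    ∀ m nowInd k count, nowInd + 1 = (2 * k + 1) * step → cs.length - nowInd ≤ m →
      pvInnerA cs step hstep nowInd count
        = count + ((List.range' nowInd (cs.length - nowInd)).countP (pvPred cs step) : Int) := by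
  intro m
  induction m with
  | zero =>
      intro nowInd k count hform hm
      have hge : ¬ (nowInd < cs.length) := by omega
      have h0 : cs.length - nowInd = 0 := by omega
      rw [pvInnerA, dif_neg hge, h0]
      simp
  | succ m ih =>
      intro nowInd k count hform hm
      by_cases hlt : nowInd < cs.length
      · have e2 : (2 * k + 2) * step = nowInd + 1 + step := by
          have : (2 * k + 2) * step = (2 * k + 1) * step + step := by ring
          omega
        have e3 : (2 * k + 3) * step = nowInd + 1 + 2 * step := by
          have : (2 * k + 3) * step = (2 * k + 1) * step + 2 * step := by ring
          omega
        rw [pvInnerA, dif_pos hlt]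
        set n := cs.length with hn
        set stop := min n (nowInd + step) with hstop
        have hstop1 : nowInd < stop := by omega
        have hstopn : stop ≤ n := by omega
        have hback : (stop - 1) + 1 + step = stop + step := by omega
        rw [hback, PySem.List.foldl_count_if]
        -- the scanned block lies inside the odd-quotient region
        have hblock : (List.range' nowInd (stop - nowInd)).countP (fun i => cs.getD i ' ' == '1')
            = (List.range' nowInd (stop - nowInd)).countP (pvPred cs step) := by
          refine (List.countP_congr fun i hi => ?_).symm
          rw [List.mem_range'_1] at hi
          rw [pvPred_of_odd cs step i k (by omega) (by omega)]
        by_cases hfull : nowInd + step ≤ n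
        · -- full block: stop = nowInd + step, next now_ind has the (2(k+1)+1)-form
          have hnext : (stop + step) + 1 = (2 * (k + 1) + 1) * step := by
            have : (2 * (k + 1) + 1) * step = (2 * k + 3) * step := by ring
            omega
          rw [ih (stop + step) (k + 1) _ hnext (by omega)]
          -- split the remaining positions: block ++ skip ++ rest
          have hs1 : List.range' nowInd (n - nowInd)
              = List.range' nowInd (stop - nowInd) ++ List.range' stop (n - stop) := by
            have h := pvRange'_split nowInd (stop - nowInd) (n - nowInd) (by omega)
            rw [Nat.add_sub_cancel' (by omega : nowInd ≤ stop)] at h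
            have e : n - nowInd - (stop - nowInd) = n - stop := by omega
            rwa [e] at h
          have e2' : (2 * (k + 1)) * step = (2 * k + 2) * step := by ring
          have e3' : (2 * (k + 1) + 1) * step = (2 * k + 3) * step := by ring
          -- the skipped step positions all have even quotient, so they count for nothing
          have hcut : (List.range' stop (n - stop)).countP (pvPred cs step)
              = (List.range' (stop + step) (n - (stop + step))).countP (pvPred cs step) := by
            by_cases hc : stop + step ≤ n
            · have h := pvRange'_split stop step (n - stop) (by omega)
              have e : n - stop - step = n - (stop + step) := by omega
              rw [e] at h
              rw [h, List.countP_append, List.countP_eq_zero.2 fun i hi => ?_, Nat.zero_add]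
              rw [List.mem_range'_1] at hi
              have := pvPred_false_of_even cs step i (k + 1) (by omega) (by omega)
              simp [this]
            · have h0 : n - (stop + step) = 0 := by omega
              rw [h0]
              refine List.countP_eq_zero.2 fun i hi => ?_
              rw [List.mem_range'_1] at hi
              have := pvPred_false_of_even cs step i (k + 1) (by omega) (by omega)
              simp [this]
          rw [hs1, List.countP_append, hcut, ← hblock]
          push_cast
          ring
        · -- truncated block: stop = n, next now_ind ≥ n, loop ends
          have hstope : stop = n := by omega
          rw [pvInnerA, dif_neg (by omega : ¬ (stop + step < cs.length))]
          have hlen : n - nowInd = stop - nowInd := by omega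
          rw [hlen, hblock]
      · have h0 : cs.length - nowInd = 0 := by omega
        rw [pvInnerA, dif_neg hlt, h0]
        simp

-- B's per-group sum equals the same count, over the whole range of positions
lemma pvCountB_eq (cs : List Char) (b : Nat) :
    pvCountB cs b = ((List.range cs.length).countP (pvPred cs (2 ^ b)) : Int) := by
  unfold pvCountB
  rw [PySem.List.foldl_count_if]
  simp only [Int.zero_add]
  congr 1
  refine List.countP_congr fun i _ => ?_
  simp only [pvPred, Nat.shiftRight_eq_div_pow, Nat.and_one_is_mod]

-- A's group count for step = 2^b equals B's: positions below 2^b - 1 have quotient 0 (even)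
lemma pvInnerA_head (cs : List Char) (b : Nat) (hstep : 0 < 2 ^ b) :
    pvInnerA cs (2 ^ b) hstep (2 ^ b - 1) 0 = pvCountB cs b := by
  have h0 : (2 ^ b - 1) + 1 = (2 * 0 + 1) * 2 ^ b := by
    have : (2 * 0 + 1) * 2 ^ b = 2 ^ b := by ring
    omega
  rw [pvInnerA_eq cs (2 ^ b) hstep cs.length (2 ^ b - 1) 0 0 h0 (by omega), pvCountB_eq]
  by_cases hc : 2 ^ b - 1 ≤ cs.length
  · have hsplit : List.range cs.length
        = List.range' 0 (2 ^ b - 1) ++ List.range' (2 ^ b - 1) (cs.length - (2 ^ b - 1)) := by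
      rw [List.range_eq_range', pvRange'_split 0 (2 ^ b - 1) cs.length hc, Nat.zero_add]
    have hlow : (List.range' 0 (2 ^ b - 1)).countP (pvPred cs (2 ^ b)) = 0 := by
      refine List.countP_eq_zero.2 fun i hi => ?_
      rw [List.mem_range'_1] at hi
      have e : (2 * 0 + 1) * 2 ^ b = 2 ^ b := by ring
      have := pvPred_false_of_even cs (2 ^ b) i 0 (by simp) (by omega)
      simp [this]
    rw [hsplit, List.countP_append, hlow]
    push_cast
    ring
  · -- then cs.length < 2^b - 1: both counts are zero
    have h1 : cs.length - (2 ^ b - 1) = 0 := by omega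
    have hall : (List.range cs.length).countP (pvPred cs (2 ^ b)) = 0 := by
      refine List.countP_eq_zero.2 fun i hi => ?_
      rw [List.mem_range] at hi
      have e : (2 * 0 + 1) * 2 ^ b = 2 ^ b := by ring
      have := pvPred_false_of_even cs (2 ^ b) i 0 (by simp) (by omega)
      simp [this]
    rw [h1, hall]
    simp

-- the two loops walk the same groups: step = 2^b throughout
lemma pvOuterA_eq_loopB (cs : List Char) :
    ∀ m b (hstep : 0 < 2 ^ b) units, cs.length - 2 ^ b ≤ m →
      pvOuterA cs (2 ^ b) hstep units = pvLoopB cs b units := by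
  intro m
  induction m with
  | zero =>
      intro b hstep units hm
      have h1 : ¬ (2 ^ b < cs.length) := by omega
      have h2 : ¬ (1 <<< b < cs.length) := by rwa [Nat.one_shiftLeft]
      rw [pvOuterA, dif_neg h1, pvLoopB, dif_neg h2]
  | succ m ih =>
      intro b hstep units hm
      by_cases h : 2 ^ b < cs.length
      · have h' : 1 <<< b < cs.length := by rwa [Nat.one_shiftLeft]
        rw [pvOuterA, dif_pos h, pvLoopB, dif_pos h', pvInnerA_head cs b hstep]
        have hlt : 2 ^ b < 2 ^ (b + 1) := Nat.pow_lt_pow_succ (by norm_num)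
        exact ih (b + 1) (by positivity) (units ++ [pvCountB cs b]) (by omega)
      · have h' : ¬ (1 <<< b < cs.length) := by rwa [Nat.one_shiftLeft]
        rw [pvOuterA, dif_neg h, pvLoopB, dif_neg h']

-- ===== VERDICT (by name: the statement is the Claim_ definition above) =====
theorem counter_number_of_unit_spec : Claim_equal_counter_number_of_unit := by
  intro s _
  unfold Spec_counter_number_of_unit counter_number_of_unit counter_number_of_unit_alt
  exact pvOuterA_eq_loopB s.toList s.toList.length 0 (by positivity) [] (by omega)
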